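-- pv_equiv track=rewrite | github.com/ishyummy/baekjoon | 2020 KAKAO BLIND RECRUITMENT 괄호 변환.py | step4
-- ===== SOURCE A (Python) =====
-- def check(w):           # 올바른 괄호 문자열인지 검사하는 함수
--     count = 0
--     for c in w:
--         if c == '(':
--             count += 1
--         else:
--             count -= 1
--         if count < 0:
--             return 0
--     return 1
--
-- def step4(u, v):        # 4단계 진행
--     temp = '('
--     temp += step123(v)
--     temp += ')'
--
--     for c in u[1:len(u) - 1]:
--         if c == '(':
--             temp += ')'
--         else:
--             temp += '('
--     return temp
--
-- def step123(w):     # 1~3단계 재귀로 진행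
--     u = ''
--     count = 0
--     if not w:
--         return w
--     for c in w:
--         if c == '(':
--             count += 1
--         else:
--             count -= 1
--         u += c
--         if count == 0:
--             break
--     v = w[len(u):]
--
--     if check(u):
--         return u + step123(v)
--     else:
--         return step4(u, v)
-- ===== SOURCE B (Python) =====
-- def step4(u, v):
--     # Iterative worklist instead of mutual recursion: one fused scan per chunk
--     # (split + validity check in a single pass), output built from list parts.
--     def flip_inner(s):
--         return ''.join(')' if c == '(' else '(' for c in s[1:len(s) - 1])
--     parts = ['(']
--     tails = [')' + flip_inner(u)]
--     w = v
--     while w: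
--         count = 0
--         ok = True
--         i = 0
--         n = len(w)
--         while i < n:
--             count += 1 if w[i] == '(' else -1
--             if count < 0:
--                 ok = False
--             i += 1
--             if count == 0:
--                 break
--         p, w = w[:i], w[i:]
--         if ok:
--             parts.append(p)
--         else:
--             parts.append('(')
--             tails.append(')' + flip_inner(p))
--     parts.extend(reversed(tails))
--     return ''.join(parts)
-- ===== Notes on version B (the rewrite author's own statement) =====
-- stated objective: alternative
-- what changed: Replaced the step4/step123 mutual recursion with an iterative worklist that fuses the prefix-split and the check into one scan per chunk and assembles the result from a list of parts joined once, instead of recursive calls with string slicing and char-by-char concatenation.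
import Mathlib
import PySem

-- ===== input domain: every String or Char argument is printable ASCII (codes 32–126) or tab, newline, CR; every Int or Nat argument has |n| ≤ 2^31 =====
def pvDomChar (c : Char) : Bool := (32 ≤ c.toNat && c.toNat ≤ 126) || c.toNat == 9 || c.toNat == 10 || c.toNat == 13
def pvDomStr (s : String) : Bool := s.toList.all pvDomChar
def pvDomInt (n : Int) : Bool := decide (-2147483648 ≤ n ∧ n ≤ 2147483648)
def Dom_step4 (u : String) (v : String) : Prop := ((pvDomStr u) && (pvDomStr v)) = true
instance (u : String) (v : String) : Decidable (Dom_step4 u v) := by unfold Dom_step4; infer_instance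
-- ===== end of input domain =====

-- B replaces A's mutual recursion and char-by-char string concatenation by an iterative
-- worklist with a fused split+check scan and a list-of-parts builder (objective: alternative).

-- ===== PORT A =====
-- check(w): running count, returns 0 on the first negative prefix count, else 1
def pvCheck : List Char → Int → Int
  | [], _ => 1
  | c :: cs, count =>
    let count := if c = '(' then count + 1 else count - 1
    if count < 0 then 0 else pvCheck cs count

-- the u-building loop of step123: take chars until the running count hits 0 (or the end)
def pvTake : List Char → Int → List Char
  | [], _ => []
  | c :: cs, count =>
    let count := if c = '(' then count + 1 else count - 1
    if count = 0 then [c] else c :: pvTake cs count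

theorem pvTake_length_le (w : List Char) (count : Int) : (pvTake w count).length ≤ w.length := by
  induction w generalizing count with
  | nil => simp [pvTake]
  | cons c cs ih =>
    simp only [pvTake]
    split <;> split <;> simp <;> exact ih _

theorem pvTake_length_pos (c : Char) (cs : List Char) (count : Int) :
    1 ≤ (pvTake (c :: cs) count).length := by
  simp only [pvTake]
  split <;> split <;> simp

mutual
-- step123(w): peel off the prefix u where the running count first returns to 0, recurse on the rest
def pvStep123 : List Char → List Char
  | [] => []
  | c :: cs =>
    let u := pvTake (c :: cs) 0
    let v := (c :: cs).drop u.length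
    if pvCheck u 0 ≠ 0 then u ++ pvStep123 v else pvStep4L u v
termination_by w => 2 * w.length
decreasing_by
  · have h1 := pvTake_length_pos c cs 0
    have h2 := pvTake_length_le (c :: cs) 0
    simp only [List.length_drop]
    omega
  · have h1 := pvTake_length_pos c cs 0
    have h2 := pvTake_length_le (c :: cs) 0
    simp only [List.length_drop]
    omega

-- step4(u,v): '(' + step123(v) + ')', then flip each char of u[1:len(u)-1], appended one by one
def pvStep4L (u v : List Char) : List Char :=
  let temp := '(' :: pvStep123 v ++ [')']
  (PySem.List.slice u (some 1) (some ((u.length : Int) - 1))).foldl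
    (fun t c => t ++ [if c = '(' then ')' else '(']) temp
termination_by 2 * v.length + 1
decreasing_by omega
end

def step4 (u : String) (v : String) : String :=
  String.ofList (pvStep4L u.toList v.toList)

-- ===== PORT B =====
-- flip_inner(s): map each char of s[1:len(s)-1] to the opposite bracket
def pvFlip (s : List Char) : List Char :=
  (PySem.List.slice s (some 1) (some ((s.length : Int) - 1))).map
    (fun c => if c = '(' then ')' else '(')

-- the fused inner while loop: split off the minimal zero-count prefix and record
-- in `ok` whether the running count ever went negative (single pass)
def pvScan : List Char → Int → Bool → List Char × Bool
  | [], _, ok => ([], ok)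
  | c :: cs, count, ok =>
    let count := if c = '(' then count + 1 else count - 1
    let ok := if count < 0 then false else ok
    if count = 0 then ([c], ok)
    else
      let r := pvScan cs count ok
      (c :: r.1, r.2)

theorem pvScan_fst_eq (w : List Char) (count : Int) (ok : Bool) :
    (pvScan w count ok).1 = pvTake w count := by
  induction w generalizing count ok with
  | nil => simp [pvScan, pvTake]
  | cons c cs ih =>
    simp only [pvScan, pvTake]
    split <;> split <;> simp <;> exact ih _ _

-- the outer while loop: parts accumulates the front pieces, tails the pending suffixes
def pvLoop : List Char → List (List Char) → List (List Char) → List Char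
  | [], parts, tails => (parts ++ tails.reverse).flatten
  | c :: cs, parts, tails =>
    let r := pvScan (c :: cs) 0 true
    let rest := (c :: cs).drop r.1.length
    if r.2 then pvLoop rest (parts ++ [r.1]) tails
    else pvLoop rest (parts ++ [['(']]) (tails ++ [')' :: pvFlip r.1])
termination_by w => w.length
decreasing_by
  all_goals
    have h1 := pvTake_length_pos c cs 0
    have h2 := pvTake_length_le (c :: cs) 0
    have h3 := pvScan_fst_eq (c :: cs) 0 true
    simp only [List.length_drop, List.length_cons, h3] at *
    omega

def step4_alt (u : String) (v : String) : String :=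
  String.ofList (pvLoop v.toList [['(']] [')' :: pvFlip u.toList])

-- ===== PRECONDITION & SPEC =====
def Spec_step4 (u : String) (v : String) (out : String) : Prop := out = step4_alt u v
instance (u : String) (v : String) (out : String) : Decidable (Spec_step4 u v out) := by unfold Spec_step4; infer_instance

-- ===== CLAIM (what is proved, stated in full; the proofs are below) =====
def Claim_equal_step4 : Prop := ∀ (u : String) (v : String), Dom_step4 u v → Spec_step4 u v (step4 u v)

-- ===== LEMMAS AND PROOFS =====

-- B's fused scan computes A's prefix together with A's check of that prefix
theorem pvScan_eq (w : List Char) (count : Int) (ok : Bool) :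
    pvScan w count ok = (pvTake w count, ok && !(pvCheck (pvTake w count) count == 0)) := by
  induction w generalizing count ok with
  | nil => simp [pvScan, pvTake, pvCheck]
  | cons c cs ih =>
    simp only [pvScan, pvTake, pvCheck]
    by_cases hz : (if c = '(' then count + 1 else count - 1) = 0
    · have hneg : ¬ (if c = '(' then count + 1 else count - 1) < 0 := by omega
      simp [hz, hneg, pvCheck]
    · simp only [if_neg hz, ih]
      by_cases hneg : (if c = '(' then count + 1 else count - 1) < 0
      · simp [pvCheck, hneg]
      · simp [pvCheck, hneg]

theorem foldl_append_map (l : List Char) (t : List Char) (f : Char → Char) :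
    l.foldl (fun t c => t ++ [f c]) t = t ++ l.map f := by
  induction l generalizing t with
  | nil => simp
  | cons c cs ih => simp [ih]

-- A's step4 equals '(' :: step123 v ++ ')' :: flipped interior of u
theorem pvStep4L_eq (u v : List Char) :
    pvStep4L u v = '(' :: pvStep123 v ++ ')' :: pvFlip u := by
  rw [pvStep4L, pvFlip, foldl_append_map]
  simp

-- loop invariant: the iterative worklist computes A's recursive step123 result
theorem pvLoop_eq (n : Nat) (w : List Char) (hw : w.length ≤ n) (parts tails : List (List Char)) :
    pvLoop w parts tails = parts.flatten ++ pvStep123 w ++ tails.reverse.flatten := by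
  induction n generalizing w parts tails with
  | zero =>
    have : w = [] := by cases w <;> simp_all
    subst this
    simp [pvLoop, pvStep123]
  | succ n ih =>
    cases w with
    | nil => simp [pvLoop, pvStep123]
    | cons c cs =>
      rw [pvLoop, pvStep123]
      simp only [pvScan_eq, Bool.true_and]
      have hlen : ((c :: cs).drop (pvTake (c :: cs) 0).length).length ≤ n := by
        have h1 := pvTake_length_pos c cs 0
        have h2 := pvTake_length_le (c :: cs) 0
        simp only [List.length_drop, List.length_cons] at *
        omega
      by_cases hc : pvCheck (pvTake (c :: cs) 0) 0 = 0
      · simp only [hc, beq_self_eq_true, Bool.not_true, if_neg (by simp : ¬ (false = true)),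
          ne_eq, not_true_eq_false, if_neg, if_false]
        rw [ih _ hlen, pvStep4L_eq]
        simp [List.append_assoc]
      · have hb : (!(pvCheck (pvTake (c :: cs) 0) 0 == 0)) = true := by simp [hc]
        simp only [hb, if_true, ne_eq, hc, not_false_iff, if_pos]
        rw [ih _ hlen]
        simp [List.append_assoc]

-- ===== VERDICT (by name: the statement is the Claim_ definition above) =====
theorem step4_spec : Claim_equal_step4 := by
  intro u v _
  unfold Spec_step4 step4 step4_alt
  rw [pvLoop_eq v.toList.length v.toList (le_refl _), pvStep4L_eq]
  simp
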